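-- pv_equiv track=rewrite | github.com/QUIC-Lab/quic-lab | domain_extractor/domain_extractor.py | suffix_blacklisted
-- ===== SOURCE A (Python) =====
-- from typing import Iterable, Optional, Set, Tuple, Iterator
--
-- def suffix_blacklisted(domain: str, blacklist: Set[str]) -> bool:
--     """
--     True if 'domain' itself or any of its parent domains are in the blacklist.
--     e.g., blacklist has 'example.com' -> blocks 'example.com' and 'www.example.com'.
--     """
--     # exact match first
--     if domain in blacklist:
--         return True
--     # walk dots right-to-left, no allocations of full split list
--     i = domain.find(".")
--     while i != -1:
--         cand = domain[i + 1:]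
--         if cand in blacklist:
--             return True
--         i = domain.find(".", i + 1)
--     return False
-- ===== SOURCE B (Python) =====
-- def suffix_blacklisted(domain: str, blacklist) -> bool:
--     """
--     True if 'domain' itself or any of its parent domains are in the blacklist.
--     """
--     return any(domain == b or domain.endswith("." + b) for b in blacklist)
-- ===== Notes on version B (the rewrite author's own statement) =====
-- stated objective: idiomatic
-- what changed: Instead of walking the domain's dots and hashing each suffix into the blacklist, B iterates over the blacklist once and tests each entry with an exact match or a dot-aligned endswith.
import Mathlib
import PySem

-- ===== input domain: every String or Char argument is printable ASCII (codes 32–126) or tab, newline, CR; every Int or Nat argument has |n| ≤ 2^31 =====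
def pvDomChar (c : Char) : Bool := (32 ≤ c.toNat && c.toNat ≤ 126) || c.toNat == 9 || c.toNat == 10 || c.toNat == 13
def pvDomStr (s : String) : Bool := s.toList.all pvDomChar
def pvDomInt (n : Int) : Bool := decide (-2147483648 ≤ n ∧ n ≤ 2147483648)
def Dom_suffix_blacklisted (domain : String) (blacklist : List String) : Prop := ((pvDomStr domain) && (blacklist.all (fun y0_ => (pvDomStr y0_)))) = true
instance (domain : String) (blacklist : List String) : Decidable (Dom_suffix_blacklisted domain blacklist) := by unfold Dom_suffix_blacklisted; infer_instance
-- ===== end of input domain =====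

-- B iterates over the blacklist testing exact match or dot-aligned endswith, instead of
-- walking the domain's dots and looking each suffix up in the set (objective: idiomatic).


-- ===== PORT A =====
-- where findFrom starts at a nonnegative index: it either fails (-1) or returns a
-- position ≥ start that carries the sought (nonempty) substring, hence < length.
-- (cited by the port's termination proof and by the correctness lemmas)
theorem pvFindFromCases (l sub : List Char) (st : Int) (hsub : sub ≠ []) (h0 : 0 ≤ st) :
    PySem.Chars.findFrom l sub st none = -1 ∨
      (st ≤ PySem.Chars.findFrom l sub st none ∧
        (PySem.Chars.findFrom l sub st none).toNat < l.length) := by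
  by_cases hk : st.toNat ≤ l.length
  · rw [show st = ((st.toNat : Nat) : Int) from (Int.toNat_of_nonneg h0).symm]
    by_cases h1 : PySem.Chars.findFrom l sub (st.toNat : Int) none = -1
    · exact Or.inl h1
    · obtain ⟨hge, hpre, _⟩ := PySem.Chars.findFrom_natCast_spec l sub st.toNat hk h1
      have hne : l.drop (PySem.Chars.findFrom l sub (st.toNat : Int) none).toNat ≠ [] := by
        intro h; rw [h] at hpre
        exact hsub (List.prefix_nil.mp hpre)
      have hlen : (PySem.Chars.findFrom l sub (st.toNat : Int) none).toNat < l.length := by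
        by_contra hc
        exact hne (List.drop_eq_nil_iff.mpr (by omega))
      exact Or.inr ⟨hge, hlen⟩
  · left
    have hlt : (l.length : Int) < st := by omega
    simp only [PySem.Chars.findFrom]
    split_ifs <;> omega

-- the 'while i != -1' loop of A; 'hi' is the loop invariant (i is -1 or a valid index),
-- carried only for the termination measure
def pvALoop (l : List Char) (blacklist : List String) (i : Int)
    (hi : i = -1 ∨ (0 ≤ i ∧ i.toNat < l.length)) : Bool :=
  if h : i = -1 then false
  else
    -- cand = domain[i+1:]
    let cand := String.ofList (PySem.List.slice l (some (i + 1)) none)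
    if PySem.Set.contains blacklist cand then true
    else
      pvALoop l blacklist (PySem.Chars.findFrom l ['.'] (i + 1) none)
        (by
          rcases pvFindFromCases l ['.'] (i + 1) (by simp) (by omega) with h1 | h1
          · exact Or.inl h1
          · exact Or.inr ⟨by omega, h1.2⟩)
termination_by (if i = -1 then 0 else l.length + 1 - i.toNat)
decreasing_by
  rcases hi with h' | h'
  · exact absurd h' h
  rcases pvFindFromCases l ['.'] (i + 1) (by simp) (by omega) with h1 | h1
  · rw [if_pos h1, if_neg h]; omega
  · have : PySem.Chars.findFrom l ['.'] (i + 1) none ≠ -1 := by omega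
    rw [if_neg this, if_neg h]; omega

def suffix_blacklisted (domain : String) (blacklist : List String) : Bool :=
  -- exact match first
  if PySem.Set.contains blacklist domain then true
  else
    -- i = domain.find(".")
    pvALoop domain.toList blacklist (PySem.Str.find domain ".")
      (by
        rw [PySem.Str.find_eq, ← PySem.Chars.findFrom_zero]
        rcases pvFindFromCases domain.toList ['.'] 0 (by simp) (by omega) with h1 | h1
        · exact Or.inl h1
        · exact Or.inr ⟨h1.1, h1.2⟩)

-- ===== PORT B =====
def suffix_blacklisted_alt (domain : String) (blacklist : List String) : Bool :=
  blacklist.any (fun b => domain == b || PySem.Str.endswith domain ("." ++ b))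

-- ===== PRECONDITION & SPEC =====
def Spec_suffix_blacklisted (domain : String) (blacklist : List String) (out : Bool) : Prop := out = suffix_blacklisted_alt domain blacklist
instance (domain : String) (blacklist : List String) (out : Bool) : Decidable (Spec_suffix_blacklisted domain blacklist out) := by unfold Spec_suffix_blacklisted; infer_instance

-- ===== CLAIM (what is proved, stated in full; the proofs are below) =====
def Claim_equal_suffix_blacklisted : Prop := ∀ (domain : String) (blacklist : List String), Dom_suffix_blacklisted domain blacklist → Spec_suffix_blacklisted domain blacklist (suffix_blacklisted domain blacklist)

-- ===== LEMMAS AND PROOFS =====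

-- a dot sits at index j iff ['.'] is a prefix of the j-th tail
theorem pvDotAt (l : List Char) (j : Nat) :
    (l[j]? = some '.') ↔ ['.'] <+: l.drop j := by
  constructor
  · intro h
    have hj : j < l.length := by
      by_contra hc
      rw [List.getElem?_eq_none (by omega)] at h
      simp at h
    have : l[j] :: l.drop (j + 1) = l.drop j := List.getElem_cons_drop hj
    rw [← this]
    have : l[j] = '.' := by
      have := List.getElem?_eq_getElem hj
      rw [this] at h; exact (Option.some.inj h)
    rw [this]
    exact ⟨l.drop (j + 1), rfl⟩
  · intro h
    obtain ⟨t, ht⟩ := h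
    have hj : j < l.length := by
      have := congrArg List.length ht
      simp [List.length_drop] at this
      omega
    have : l.drop j = l[j] :: l.drop (j + 1) := (List.getElem_cons_drop hj).symm
    rw [this] at ht
    have : l[j] = '.' := (List.cons.inj ht).1.symm
    rw [List.getElem?_eq_getElem hj, this]

-- characterisation of A's loop, started at the first dot position ≥ k
theorem pvALoopIff (l : List Char) (bl : List String) (k : Nat) (hk : k ≤ l.length)
    (r : Int) (hrdef : r = PySem.Chars.findFrom l ['.'] (k : Int) none)
    (hi : r = -1 ∨ (0 ≤ r ∧ r.toNat < l.length)) :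
    pvALoop l bl r hi = true ↔
      ∃ j : Nat, k ≤ j ∧ j < l.length ∧ l[j]? = some '.' ∧
        PySem.Set.contains bl (String.ofList (l.drop (j + 1))) = true := by
  by_cases hr : r = -1
  · rw [pvALoop, dif_pos hr]
    simp only [Bool.false_eq_true, false_iff]
    rintro ⟨j, hkj, hjl, hdot, _⟩
    have hno := (PySem.Chars.findFrom_natCast_eq_neg_one_iff l ['.'] k hk).mp (hrdef ▸ hr)
    apply hno
    have hpre : ['.'] <+: l.drop j := (pvDotAt l j).mp hdot
    have hsuf : l.drop j <:+ l.drop k := by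
      rw [show j = k + (j - k) from by omega, ← List.drop_drop]
      exact List.drop_suffix _ _
    exact hpre.isInfix.trans hsuf.isInfix
  · obtain ⟨hge, hpre, hmin⟩ :=
      hrdef ▸ PySem.Chars.findFrom_natCast_spec l ['.'] k hk (by rw [← hrdef]; exact hr)
    have h0r : 0 ≤ r := le_trans (by omega) hge
    have hrl : r.toNat < l.length := by
      rcases hi with h | h
      · exact absurd h hr
      · exact h.2
    have hdotr : l[r.toNat]? = some '.' := (pvDotAt l r.toNat).mpr hpre
    rw [pvALoop, dif_neg hr]
    rw [PySem.List.slice_from l (show (0:Int) ≤ r + 1 by omega),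
      show (r + 1).toNat = r.toNat + 1 from by omega]
    by_cases hc : PySem.Set.contains bl (String.ofList (l.drop (r.toNat + 1))) = true
    · rw [if_pos hc]
      simp only [true_iff]
      exact ⟨r.toNat, by omega, hrl, hdotr, hc⟩
    · rw [if_neg hc]
      have hstep : (r + 1 : Int) = ((r.toNat + 1 : Nat) : Int) := by omega
      have hk' : r.toNat + 1 ≤ l.length := by omega
      rw [pvALoopIff l bl (r.toNat + 1) hk' (PySem.Chars.findFrom l ['.'] (r + 1) none)
        (by rw [hstep])]
      constructor
      · rintro ⟨j, hj1, hj2, hj3, hj4⟩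
        exact ⟨j, by omega, hj2, hj3, hj4⟩
      · rintro ⟨j, hj1, hj2, hj3, hj4⟩
        refine ⟨j, ?_, hj2, hj3, hj4⟩
        rcases Nat.lt_or_ge j (r.toNat + 1) with hlt | hge'
        · -- j ≤ r.toNat; j < r.toNat contradicts minimality, j = r.toNat contradicts hc
          rcases Nat.lt_or_ge j r.toNat with hlt' | hge''
          · exact absurd ((pvDotAt l j).mp hj3) (hmin j hj1 hlt')
          · have : j = r.toNat := by omega
            rw [this] at hj4
            exact absurd hj4 hc
        · exact hge'
termination_by l.length - k
decreasing_by omega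

-- B = true iff some blacklist entry is the domain or a dot-aligned proper suffix
theorem pvAltIff (domain : String) (bl : List String) :
    suffix_blacklisted_alt domain bl = true ↔
      ∃ b ∈ bl, domain = b ∨ ('.' :: b.toList) <:+ domain.toList := by
  unfold suffix_blacklisted_alt
  rw [List.any_eq_true]
  constructor
  · rintro ⟨b, hb, h⟩
    rcases Bool.or_eq_true_iff.mp h with h | h
    · exact ⟨b, hb, Or.inl (by simpa using h)⟩
    · rw [PySem.Str.endswith_eq] at h
      have := (PySem.Chars.endswith_iff _ _).mp h
      refine ⟨b, hb, Or.inr ?_⟩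
      simpa [String.toList_append] using this
  · rintro ⟨b, hb, h⟩
    refine ⟨b, hb, Bool.or_eq_true_iff.mpr ?_⟩
    rcases h with h | h
    · exact Or.inl (by simp [h])
    · refine Or.inr ?_
      rw [PySem.Str.endswith_eq]
      apply (PySem.Chars.endswith_iff _ _).mpr
      simpa [String.toList_append] using h

-- Set.contains is membership (blacklist entries are distinct; membership by ==)
theorem pvContainsIff (bl : List String) (s : String) :
    PySem.Set.contains bl s = true ↔ s ∈ bl := by
  simp [PySem.Set.contains]

-- the dot-suffix forms coincide
theorem pvSuffixForms (l : List Char) (bl : List String) :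
    (∃ j : Nat, j < l.length ∧ l[j]? = some '.' ∧
        PySem.Set.contains bl (String.ofList (l.drop (j + 1))) = true) ↔
      ∃ b ∈ bl, ('.' :: b.toList) <:+ l := by
  constructor
  · rintro ⟨j, hjl, hdot, hc⟩
    refine ⟨String.ofList (l.drop (j + 1)), (pvContainsIff _ _).mp hc, ?_⟩
    have : ('.' : Char) :: l.drop (j + 1) = l.drop j := by
      have h1 : l[j] :: l.drop (j + 1) = l.drop j := List.getElem_cons_drop hjl
      have h2 : l[j] = '.' := by
        have := List.getElem?_eq_getElem hjl
        rw [this] at hdot; exact Option.some.inj hdot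
      rw [← h1, h2]
    simpa [this] using List.drop_suffix j l
  · rintro ⟨b, hb, t, ht⟩
    refine ⟨t.length, ?_, ?_, ?_⟩
    · have := congrArg List.length ht
      simp at this
      omega
    · apply (pvDotAt l t.length).mpr
      rw [← ht, List.drop_left' rfl]
      exact ⟨b.toList, rfl⟩
    · have hdrop : l.drop (t.length + 1) = b.toList := by
        rw [← ht, show t.length + 1 = (t ++ ['.']).length from by simp,
          show t ++ '.' :: b.toList = (t ++ ['.']) ++ b.toList from by simp]
        exact List.drop_left' rfl
      rw [hdrop]
      exact (pvContainsIff _ _).mpr (by simpa using hb)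

-- A = true iff the same condition
theorem pvAIff (domain : String) (bl : List String) :
    suffix_blacklisted domain bl = true ↔
      ∃ b ∈ bl, domain = b ∨ ('.' :: b.toList) <:+ domain.toList := by
  unfold suffix_blacklisted
  by_cases hc : PySem.Set.contains bl domain = true
  · rw [if_pos hc]
    simp only [true_iff]
    exact ⟨domain, (pvContainsIff _ _).mp hc, Or.inl rfl⟩
  · rw [if_neg hc]
    rw [pvALoopIff domain.toList bl 0 (by omega) (PySem.Str.find domain ".")
      (by rw [PySem.Str.find_eq, ← PySem.Chars.findFrom_zero]; norm_num; rfl)]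
    constructor
    · rintro ⟨j, _, hj2, hj3, hj4⟩
      have := (pvSuffixForms domain.toList bl).mp ⟨j, hj2, hj3, hj4⟩
      obtain ⟨b, hb, hsuf⟩ := this
      exact ⟨b, hb, Or.inr hsuf⟩
    · rintro ⟨b, hb, h⟩
      rcases h with h | h
      · exact absurd ((pvContainsIff bl domain).mpr (h ▸ hb)) hc
      · obtain ⟨j, hj2, hj3, hj4⟩ := (pvSuffixForms domain.toList bl).mpr ⟨b, hb, h⟩
        exact ⟨j, by omega, hj2, hj3, hj4⟩

-- ===== VERDICT (by name: the statement is the Claim_ definition above) =====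
theorem suffix_blacklisted_spec : Claim_equal_suffix_blacklisted := by
  intro domain blacklist _
  unfold Spec_suffix_blacklisted
  by_cases h : ∃ b ∈ blacklist, domain = b ∨ ('.' :: b.toList) <:+ domain.toList
  · rw [(pvAIff domain blacklist).mpr h, ((pvAltIff domain blacklist).mpr h).symm]
  · have h1 := (pvAIff domain blacklist).not.mpr h
    have h2 := (pvAltIff domain blacklist).not.mpr h
    simp only [Bool.not_eq_true] at h1 h2
    rw [h1, h2]
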